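-- pv_equiv track=rewrite | github.com/ptacek/advent-of-code-solutions | 2020/Day16/TicketTranslation.py | validateValuesNearby
-- ===== SOURCE A (Python) =====
-- def validateTicket(ticket, rules):
--     invalidValues = []
--
--     for value in ticket:
--         valid = False
--         for ruleName in rules:
--             for range in rules[ruleName]:
--                 if value >= range[0] and value <= range[1]:
--                     valid = True
--
--         if valid is not True:
--             invalidValues.append(value)
--
--     return invalidValues
--
-- def validateValuesNearby(tickets, rules):
--     invalidValues = []
--     validTickets = []
--
--     for ticket in tickets:
--         invalid = validateTicket(ticket, rules)
--
--         if len(invalid) > 0: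
--             invalidValues += invalid
--         else:
--             validTickets.append(ticket)
--
--     return (invalidValues, validTickets)
-- ===== SOURCE B (Python) =====
-- def validateValuesNearby(tickets, rules):
--     intervals = [(rng[0], rng[1]) for ranges in rules.values() for rng in ranges]
--     intervals.sort(key=lambda iv: iv[0])
--     merged = []
--     for lo, hi in intervals:
--         if merged and lo <= merged[-1][1]:
--             if hi > merged[-1][1]:
--                 merged[-1] = (merged[-1][0], hi)
--         else:
--             merged.append((lo, hi))
--
--     invalidValues = []
--     validTickets = []
--     for ticket in tickets:
--         bad = [v for v in ticket if not _covered(v, merged)]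
--         if bad:
--             invalidValues.extend(bad)
--         else:
--             validTickets.append(ticket)
--     return (invalidValues, validTickets)
--
-- def _covered(v, merged):
--     for lo, hi in merged:
--         if v < lo:
--             return False
--         if v <= hi:
--             return True
--     return False
-- ===== Notes on version B (the rewrite author's own statement) =====
-- stated objective: faster
-- what changed: B sorts all rule ranges once, merges them into disjoint intervals, and tests each ticket value with a single early-exit scan of the merged intervals, instead of A's re-scan of every range of every rule for every ticket value.
-- outside the precondition, e.g. on validateValuesNearby([[0]], {'a': [[5]]}): A returns ([0], []), B raises IndexError; on validateValuesNearby([], {'a': [[]]}): A returns ([], []), B raises IndexError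
import Mathlib
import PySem

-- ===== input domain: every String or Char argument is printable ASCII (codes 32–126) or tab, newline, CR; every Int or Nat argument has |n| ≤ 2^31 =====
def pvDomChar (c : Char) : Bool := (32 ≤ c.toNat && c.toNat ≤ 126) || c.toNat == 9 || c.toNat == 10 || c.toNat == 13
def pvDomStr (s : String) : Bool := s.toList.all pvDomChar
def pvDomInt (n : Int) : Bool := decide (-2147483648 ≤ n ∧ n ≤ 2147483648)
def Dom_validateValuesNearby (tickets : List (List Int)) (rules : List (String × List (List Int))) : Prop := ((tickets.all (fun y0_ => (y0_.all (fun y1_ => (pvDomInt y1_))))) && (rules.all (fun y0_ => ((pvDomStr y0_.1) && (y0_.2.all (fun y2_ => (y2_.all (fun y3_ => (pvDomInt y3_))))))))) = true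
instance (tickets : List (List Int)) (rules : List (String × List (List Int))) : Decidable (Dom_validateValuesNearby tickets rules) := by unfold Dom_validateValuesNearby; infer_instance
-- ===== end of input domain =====

-- B sorts and merges all rule ranges once and tests each ticket value against the merged intervals with an
-- early-exit scan, instead of A's rescan of every range of every rule for every value (measured faster).

-- ===== PORT A =====
-- 'value >= range[0] and value <= range[1]'; Python raises IndexError on a range row of length < 2
-- (short-circuit: a row [a] raises only when value >= a); such inputs are excluded by Pre_validateValuesNearby.
def pvRangeHit (value : Int) (r : List Int) : Bool :=
  match r with
  | a :: b :: _ => decide (value ≥ a) && decide (value ≤ b)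
  | _ => false

def validateTicket (ticket : List Int) (rules : PySem.Dict String (List (List Int))) : List Int :=
  ticket.foldl (fun invalidValues value =>
    let valid := rules.keys.foldl (fun valid ruleName =>
      (rules.getD ruleName []).foldl (fun valid r =>
        if pvRangeHit value r then true else valid) valid) false
    if valid ≠ true then invalidValues ++ [value] else invalidValues) []

def validateValuesNearby (tickets : List (List Int)) (rules : List (String × List (List Int))) : List Int × List (List Int) :=
  -- the Python 'rules' argument is a dict built from the association list
  let d := PySem.Dict.ofList rules
  tickets.foldl (fun acc ticket =>
    let invalid := validateTicket ticket d
    if invalid.length > 0 then (acc.1 ++ invalid, acc.2) else (acc.1, acc.2 ++ [ticket])) ([], [])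

-- ===== PORT B =====
-- '(rng[0], rng[1])'; Python raises IndexError on a row of length < 2 — excluded by Pre_validateValuesNearby.
def pvPairOf (r : List Int) : Int × Int :=
  match r with
  | a :: b :: _ => (a, b)
  | _ => (0, 0)

def pvMergeStep (merged : List (Int × Int)) (iv : Int × Int) : List (Int × Int) :=
  match merged.getLast? with
  | some last =>
      if iv.1 ≤ last.2 then
        if iv.2 > last.2 then merged.dropLast ++ [(last.1, iv.2)] else merged
      else merged ++ [iv]
  | none => merged ++ [iv]

def pvCovered (v : Int) : List (Int × Int) → Bool
  | [] => false
  | (lo, hi) :: rest => if v < lo then false else if v ≤ hi then true else pvCovered v rest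

def validateValuesNearby_alt (tickets : List (List Int)) (rules : List (String × List (List Int))) : List Int × List (List Int) :=
  let intervals := PySem.List.sorted
    ((PySem.Dict.ofList rules).values.flatMap (fun ranges => ranges.map (fun rng => pvPairOf rng)))
    (fun iv => iv.1)
  let merged := intervals.foldl pvMergeStep []
  tickets.foldl (fun acc ticket =>
    let bad := ticket.filter (fun v => !pvCovered v merged)
    if bad ≠ [] then (acc.1 ++ bad, acc.2) else (acc.1, acc.2 ++ [ticket])) ([], [])

-- ===== PRECONDITION & SPEC =====
-- Pre_ excludes inputs with a rule range row of fewer than two numbers: on such rows Python A raises IndexError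
-- whenever a ticket value indexes them (and returns only accidentally when no ticket value reaches the row or
-- the short-circuit 'and' skips rng[1]), while B raises IndexError on every such row when building its intervals.
def Pre_validateValuesNearby (tickets : List (List Int)) (rules : List (String × List (List Int))) : Prop :=
  ∀ ranges ∈ (PySem.Dict.ofList rules).values, ∀ r ∈ ranges, 2 ≤ r.length
instance (tickets : List (List Int)) (rules : List (String × List (List Int))) : Decidable (Pre_validateValuesNearby tickets rules) := by unfold Pre_validateValuesNearby; infer_instance

def pvWitness_validateValuesNearby : List (List Int) × (List (String × List (List Int))) :=
  ([[3], [10]], [("row", [[1, 5]])])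

def Spec_validateValuesNearby (tickets : List (List Int)) (rules : List (String × List (List Int))) (out : List Int × List (List Int)) : Prop := out = validateValuesNearby_alt tickets rules
instance (tickets : List (List Int)) (rules : List (String × List (List Int))) (out : List Int × List (List Int)) : Decidable (Spec_validateValuesNearby tickets rules out) := by unfold Spec_validateValuesNearby; infer_instance

-- ===== CLAIM (what is proved, stated in full; the proofs are below) =====
def Claim_equal_validateValuesNearby : Prop := ∀ (tickets : List (List Int)) (rules : List (String × List (List Int))), Dom_validateValuesNearby tickets rules → Pre_validateValuesNearby tickets rules → Spec_validateValuesNearby tickets rules (validateValuesNearby tickets rules)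

-- ===== LEMMAS AND PROOFS =====

-- the interval membership test, and the merged interval list B computes, as named objects for the proofs
def pvCov (v : Int) (q : Int × Int) : Bool := decide (q.1 ≤ v) && decide (v ≤ q.2)

def pvMerged (rules : List (String × List (List Int))) : List (Int × Int) :=
  (PySem.List.sorted
    ((PySem.Dict.ofList rules).values.flatMap (fun ranges => ranges.map (fun rng => pvPairOf rng)))
    (fun iv => iv.1)).foldl pvMergeStep []

-- A's nested 'valid' loops are an any-of-any
lemma pv_flag_eq_any {κ : Type} (ks : List κ) (f : κ → List (List Int)) (v : Int) (b : Bool) :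
    ks.foldl (fun valid k => (f k).foldl (fun valid r => if pvRangeHit v r then true else valid) valid) b
      = (b || ks.any (fun k => (f k).any (pvRangeHit v))) := by
  induction ks generalizing b with
  | nil => simp
  | cons k t ih =>
      rw [List.foldl_cons, PySem.List.foldl_if_true_eq, ih, List.any_cons, Bool.or_assoc]

-- the early-exit scan is an 'any' on a list sorted by lower bound
lemma pv_covered_eq_any (v : Int) (m : List (Int × Int)) (h : m.Pairwise (fun a b => a.1 ≤ b.1)) :
    pvCovered v m = m.any (pvCov v) := by
  induction m with
  | nil => rfl
  | cons p t ih =>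
      obtain ⟨hp, ht⟩ := List.pairwise_cons.mp h
      obtain ⟨lo, hi⟩ := p
      by_cases h1 : v < lo
      · have hrest : t.any (pvCov v) = false := by
          simp only [List.any_eq_false]
          intro q hq
          have := hp q hq
          simp only [pvCov, Bool.and_eq_true, decide_eq_true_eq, not_and]
          intro h2
          omega
        simp [pvCovered, h1, hrest, pvCov]
      · by_cases h2 : v ≤ hi
        · simp [pvCovered, h1, h2, pvCov]
          exact Or.inl (by omega)
        · simp only [pvCovered, if_neg h1, if_neg h2, List.any_cons, ih ht, pvCov]
          have : (decide (lo ≤ v) && decide (v ≤ hi)) = false := by simp; omega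
          simp [this]

-- one merge step: keeps the list sorted by lower bound, keeps all lower bounds ≤ the new one, covers the union
lemma pv_mergeStep_props (acc : List (Int × Int)) (p : Int × Int)
    (hacc : acc.Pairwise (fun a b => a.1 ≤ b.1)) (hle : ∀ q ∈ acc, q.1 ≤ p.1) :
    (pvMergeStep acc p).Pairwise (fun a b => a.1 ≤ b.1) ∧
    (∀ q ∈ pvMergeStep acc p, q.1 ≤ p.1) ∧
    (∀ v, (pvMergeStep acc p).any (pvCov v) = (acc.any (pvCov v) || pvCov v p)) := by
  rcases List.eq_nil_or_concat acc with rfl | ⟨as, a, rfl⟩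
  · simp [pvMergeStep]
  · rw [List.concat_eq_append] at hacc hle ⊢
    have hlast : (as ++ [a]).getLast? = some a := List.getLast?_concat
    rw [List.pairwise_append] at hacc
    obtain ⟨has, -, hcross⟩ := hacc
    have ha_p : a.1 ≤ p.1 := hle a (by simp)
    have has_a : ∀ q ∈ as, q.1 ≤ a.1 := fun q hq => hcross q hq a (by simp)
    unfold pvMergeStep
    rw [hlast]
    dsimp only
    by_cases h1 : p.1 ≤ a.2
    · by_cases h2 : p.2 > a.2
      · rw [if_pos h1, if_pos h2, List.dropLast_concat]
        refine ⟨?_, ?_, ?_⟩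
        · rw [List.pairwise_append]
          exact ⟨has, by simp, by intro q hq b hb; simp at hb; subst hb; exact has_a q hq⟩
        · intro q hq
          rcases List.mem_append.mp hq with hq | hq
          · exact le_trans (has_a q hq) ha_p
          · simp at hq; subst hq; exact ha_p
        · intro v
          simp only [List.any_append, List.any_cons, List.any_nil, Bool.or_false]
          have : pvCov v (a.1, p.2) = (pvCov v a || pvCov v p) := by
            simp only [pvCov]
            by_cases hv1 : a.1 ≤ v <;> by_cases hv2 : v ≤ a.2 <;>
              by_cases hv3 : p.1 ≤ v <;> by_cases hv4 : v ≤ p.2 <;>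
              simp [hv1, hv2, hv3, hv4] <;> omega
          rw [this, Bool.or_assoc]
      · rw [if_pos h1, if_neg h2]
        refine ⟨by rw [List.pairwise_append]; exact ⟨has, by simp, hcross⟩, hle, ?_⟩
        intro v
        have hsub : pvCov v p = true → pvCov v a = true := by
          simp only [pvCov, Bool.and_eq_true, decide_eq_true_eq]
          intro ⟨x1, x2⟩
          omega
        cases hp : pvCov v p with
        | false => simp
        | true =>
            have := hsub hp
            simp only [List.any_append, List.any_cons, List.any_nil, this]
            simp
    · rw [if_neg h1]
      refine ⟨?_, ?_, ?_⟩
      · rw [List.pairwise_append]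
        refine ⟨by rw [List.pairwise_append]; exact ⟨has, by simp, hcross⟩, by simp, ?_⟩
        intro q hq b hb
        simp at hb
        subst hb
        rcases List.mem_append.mp hq with hq | hq
        · exact le_trans (has_a q hq) ha_p
        · simp at hq; subst hq; exact ha_p
      · intro q hq
        rcases List.mem_append.mp hq with hq | hq
        · exact hle q hq
        · simp at hq; subst hq; exact le_rfl
      · intro v
        simp [List.any_append, Bool.or_assoc]

-- the whole merge loop, from any compatible accumulator
lemma pv_merge_foldl (l : List (Int × Int)) (acc : List (Int × Int))
    (hacc : acc.Pairwise (fun a b => a.1 ≤ b.1))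
    (hsep : ∀ q ∈ acc, ∀ p ∈ l, q.1 ≤ p.1)
    (hl : l.Pairwise (fun a b => a.1 ≤ b.1)) :
    (l.foldl pvMergeStep acc).Pairwise (fun a b => a.1 ≤ b.1) ∧
    ∀ v, (l.foldl pvMergeStep acc).any (pvCov v) = (acc.any (pvCov v) || l.any (pvCov v)) := by
  induction l generalizing acc with
  | nil => simpa using hacc
  | cons p t ih =>
      obtain ⟨hpt, ht⟩ := List.pairwise_cons.mp hl
      obtain ⟨h1, h2, h3⟩ := pv_mergeStep_props acc p hacc (fun q hq => hsep q hq p (by simp))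
      have hsep' : ∀ q ∈ pvMergeStep acc p, ∀ p' ∈ t, q.1 ≤ p'.1 :=
        fun q hq p' hp' => le_trans (h2 q hq) (hpt p' hp')
      obtain ⟨hP, hA⟩ := ih (pvMergeStep acc p) h1 hsep' ht
      refine ⟨hP, fun v => ?_⟩
      rw [List.foldl_cons, hA v, h3 v, List.any_cons, Bool.or_assoc]

-- under Pre_, A's per-value validity flag equals B's merged-interval test
lemma pv_flag_covered (tickets : List (List Int)) (rules : List (String × List (List Int)))
    (hpre : Pre_validateValuesNearby tickets rules) (v : Int) :
    (PySem.Dict.ofList rules).keys.any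
        (fun k => ((PySem.Dict.ofList rules).getD k []).any (pvRangeHit v))
      = pvCovered v (pvMerged rules) := by
  have hnd := PySem.Dict.nodup_keys_ofList rules
  have hL : (PySem.Dict.ofList rules).keys.any
        (fun k => ((PySem.Dict.ofList rules).getD k []).any (pvRangeHit v))
      = (PySem.Dict.ofList rules).values.any (fun rs => rs.any (pvRangeHit v)) := by
    rw [PySem.Dict.values_eq_map_keys _ hnd [], List.any_map]
    rfl
  have hhit : ∀ rs ∈ (PySem.Dict.ofList rules).values,
      rs.any (pvRangeHit v) = (rs.map (fun rng => pvPairOf rng)).any (pvCov v) := by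
    intro rs hrs
    rw [List.any_map]
    refine (PySem.List.any_congr_mem ?_)
    intro r hr
    have h2 := hpre rs hrs r hr
    match r, h2 with
    | a :: b :: _, _ => simp [pvRangeHit, pvPairOf, pvCov, ge_iff_le]
  have hMid : (PySem.Dict.ofList rules).values.any (fun rs => rs.any (pvRangeHit v))
      = ((PySem.Dict.ofList rules).values.flatMap (fun ranges => ranges.map (fun rng => pvPairOf rng))).any (pvCov v) := by
    rw [List.any_flatMap]
    exact PySem.List.any_congr_mem hhit
  have hsortP : (PySem.List.sorted
      ((PySem.Dict.ofList rules).values.flatMap (fun ranges => ranges.map (fun rng => pvPairOf rng)))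
      (fun iv => iv.1)).Pairwise (fun a b => a.1 ≤ b.1) :=
    PySem.List.sorted_pairwise _ _
  have hperm : (PySem.List.sorted
      ((PySem.Dict.ofList rules).values.flatMap (fun ranges => ranges.map (fun rng => pvPairOf rng)))
      (fun iv => iv.1)).Perm
      ((PySem.Dict.ofList rules).values.flatMap (fun ranges => ranges.map (fun rng => pvPairOf rng))) :=
    PySem.List.sorted_perm _ _ _
  obtain ⟨hP, hA⟩ := pv_merge_foldl _ [] (by simp) (by simp) hsortP
  rw [hL, hMid, ← hperm.any_eq, pvMerged, pv_covered_eq_any v _ hP, hA v]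
  simp

-- under Pre_, A's per-ticket helper is B's filter over the merged intervals
lemma pv_ticket_eq (tickets : List (List Int)) (rules : List (String × List (List Int)))
    (hpre : Pre_validateValuesNearby tickets rules) (ticket : List Int) :
    validateTicket ticket (PySem.Dict.ofList rules)
      = ticket.filter (fun v => !pvCovered v (pvMerged rules)) := by
  unfold validateTicket
  have hstep : (fun (invalidValues : List Int) (value : Int) =>
      let valid := (PySem.Dict.ofList rules).keys.foldl (fun valid ruleName =>
        ((PySem.Dict.ofList rules).getD ruleName []).foldl (fun valid r =>
          if pvRangeHit value r then true else valid) valid) false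
      if valid ≠ true then invalidValues ++ [value] else invalidValues)
      = fun invalidValues value =>
        if (!pvCovered value (pvMerged rules)) then invalidValues ++ [value] else invalidValues := by
    funext acc v
    simp only [pv_flag_eq_any, Bool.false_or, pv_flag_covered tickets rules hpre v]
    by_cases h : pvCovered v (pvMerged rules) <;> simp [h]
  rw [hstep, PySem.List.foldl_append_if_eq_filter]
  simp

-- ===== VERDICT (by name: the statement is the Claim_ definition above) =====
theorem validateValuesNearby_spec : Claim_equal_validateValuesNearby := by
  intro tickets rules _hdom hpre
  unfold Spec_validateValuesNearby
  show validateValuesNearby tickets rules = validateValuesNearby_alt tickets rules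
  simp only [validateValuesNearby, validateValuesNearby_alt]
  rw [show (PySem.List.sorted
      ((PySem.Dict.ofList rules).values.flatMap (fun ranges => ranges.map (fun rng => pvPairOf rng)))
      (fun iv => iv.1)).foldl pvMergeStep [] = pvMerged rules from rfl]
  apply PySem.List.foldl_congr_mem
  intro acc ticket _hmem
  rw [pv_ticket_eq tickets rules hpre ticket]
  by_cases h : ticket.filter (fun v => !pvCovered v (pvMerged rules)) = []
  · simp [h]
  · have : 0 < (ticket.filter (fun v => !pvCovered v (pvMerged rules))).length :=
      List.length_pos_iff.mpr h
    simp [h, this]
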